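-- pv_equiv track=rewrite | github.com/lucasSaavedra123/informaticaGeneral | Finales/Final Julio 2017A/JUL 2017A-Parte 1 y Parte 2.py | foo2
-- ===== SOURCE A (Python) =====
-- def foo2(A,B):
--     lst = [] + A
--     for x in B:
--         if x not in A:
--             lst.append(x)
--         else:
--             lst.remove(x)
--     return lst
-- ===== SOURCE B (Python) =====
-- def foo2(A, B):
--     sA = set(A)
--     rem = {}
--     for x in B:
--         rem[x] = rem.get(x, 0) + 1
--     kept = []
--     for a in A:
--         if rem.get(a, 0) > 0:
--             rem[a] = rem[a] - 1
--         else: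
--             kept.append(a)
--     kept.extend(x for x in B if x not in sA)
--     return kept
-- ===== Notes on version B (the rewrite author's own statement) =====
-- stated objective: faster
-- what changed: A scans A for membership and replays lst.remove(x) for every element of B (O(|A|*|B|)); B makes one counting pass over B and one pass over A that drops each element while its count-in-B budget lasts, then appends the B-elements not in set(A), in O(|A|+|B|).
import Mathlib
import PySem

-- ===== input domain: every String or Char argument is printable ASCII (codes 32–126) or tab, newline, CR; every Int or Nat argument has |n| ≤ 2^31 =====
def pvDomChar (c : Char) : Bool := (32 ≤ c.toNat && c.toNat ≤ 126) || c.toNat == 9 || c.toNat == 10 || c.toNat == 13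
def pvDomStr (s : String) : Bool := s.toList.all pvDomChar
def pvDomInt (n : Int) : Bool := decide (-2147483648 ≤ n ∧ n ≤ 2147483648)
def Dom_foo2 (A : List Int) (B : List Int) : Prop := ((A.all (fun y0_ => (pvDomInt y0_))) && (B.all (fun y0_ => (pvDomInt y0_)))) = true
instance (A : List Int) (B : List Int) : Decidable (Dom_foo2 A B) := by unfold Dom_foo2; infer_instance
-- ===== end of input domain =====

-- B replaces A's per-element scan/remove over B (O(|A|·|B|)) by one counting pass over B and
-- one pass over A (O(|A|+|B|)); return value only, neither mutates its arguments.

-- ===== PORT A =====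
-- the loop state is Option: none = the ValueError lst.remove(x) raises (excluded by Pre_foo2)
def foo2 (A : List Int) (B : List Int) : List Int :=
  (B.foldl (fun (acc : Option (List Int)) x =>
      acc.bind (fun lst =>
        if x ∉ A then some (lst ++ [x])
        else PySem.List.remove? lst x))
    (some ([] ++ A))).getD []

-- ===== PORT B =====
def foo2_alt (A : List Int) (B : List Int) : List Int :=
  let sA := PySem.Set.ofList A
  let rem := B.foldl (fun (d : PySem.Dict Int Int) x => d.insert x (d.getD x 0 + 1))
               (PySem.Dict.empty)
  let p := A.foldl (fun (p : List Int × PySem.Dict Int Int) a =>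
      if p.2.getD a 0 > 0 then (p.1, p.2.insert a (p.2.getD a 0 - 1))
      else (p.1 ++ [a], p.2)) (([] : List Int), rem)
  p.1 ++ B.filter (fun x => decide (x ∉ sA))

-- ===== PRECONDITION & SPEC =====
-- Pre_ excludes exactly the inputs on which A raises ValueError: some x ∈ A occurs more often
-- in B than in A, so lst.remove(x) eventually finds no x.
def Pre_foo2 (A : List Int) (B : List Int) : Prop := ∀ x ∈ A, B.count x ≤ A.count x
instance (A : List Int) (B : List Int) : Decidable (Pre_foo2 A B) := by unfold Pre_foo2; infer_instance

def pvWitness_foo2 : List Int × List Int := ([1, 2], [2, 3])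

def Spec_foo2 (A : List Int) (B : List Int) (out : List Int) : Prop := out = foo2_alt A B
instance (A : List Int) (B : List Int) (out : List Int) : Decidable (Spec_foo2 A B out) := by unfold Spec_foo2; infer_instance

-- ===== CLAIM (what is proved, stated in full; the proofs are below) =====
def Claim_equal_foo2 : Prop := ∀ (A : List Int) (B : List Int), Dom_foo2 A B → Pre_foo2 A B → Spec_foo2 A B (foo2 A B)

-- ===== LEMMAS AND PROOFS =====

-- the common mathematical model: scan u, silently dropping each element while its budget lasts
def strip : List Int → (Int → Int) → List Int
  | [], _ => []
  | a :: t, c =>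
      if c a > 0 then strip t (fun y => if y = a then c a - 1 else c y)
      else a :: strip t c

theorem strip_congr (u : List Int) (c c' : Int → Int)
    (h : ∀ a ∈ u, c a = c' a) : strip u c = strip u c' := by
  induction u generalizing c c' with
  | nil => rfl
  | cons a t ih =>
      have ha : c a = c' a := h a (by simp)
      simp only [strip]
      rw [ha]
      split_ifs with hpos
      · exact ih _ _ (fun b hb => by
          by_cases hba : b = a
          · simp [hba]
          · simp [hba, h b (List.mem_cons_of_mem _ hb)])
      · exact congrArg (a :: ·) (ih _ _ (fun b hb => h b (List.mem_cons_of_mem _ hb)))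

theorem strip_of_nonpos (u : List Int) (c : Int → Int)
    (h : ∀ a ∈ u, c a ≤ 0) : strip u c = u := by
  induction u with
  | nil => rfl
  | cons a t ih =>
      have : ¬ c a > 0 := by have := h a (by simp); omega
      simp only [strip, if_neg this]
      exact congrArg _ (ih (fun b hb => h b (by simp [hb])))

theorem strip_bump (u : List Int) (x : Int) (c : Int → Int)
    (hx : x ∈ u) (hc : 0 ≤ c x) :
    strip u (fun y => if y = x then c x + 1 else c y) = strip (u.erase x) c := by
  induction u generalizing c with
  | nil => simp at hx
  | cons a t ih =>
      by_cases hax : a = x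
      · subst hax
        rw [List.erase_cons_head]
        simp only [strip]
        rw [if_pos (by simp; omega)]
        refine congrArg _ (funext fun y => ?_)
        by_cases hya : y = a <;> simp [hya]
      · have hx' : x ∈ t := by
          rcases List.mem_cons.mp hx with h | h
          · exact absurd h.symm hax
          · exact h
        have herase : (a :: t).erase x = a :: t.erase x :=
          List.erase_cons_tail (by simp [hax])
        simp only [strip, if_neg hax, herase]
        by_cases hca : c a > 0
        · rw [if_pos hca, if_pos hca]
          have hfun : (fun y => if y = a then c a - 1 else if y = x then c x + 1 else c y)
              = (fun y => if y = x then (fun z => if z = a then c a - 1 else c z) x + 1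
                        else (fun z => if z = a then c a - 1 else c z) y) := by
            funext y
            by_cases hya : y = a
            · subst hya; simp [hax]
            · by_cases hyx : y = x
              · subst hyx; simp [hya]
              · simp [hya, hyx]
          rw [hfun]
          exact ih (fun z => if z = a then c a - 1 else c z) hx'
            (by show (0:Int) ≤ if x = a then c a - 1 else c x
                rw [if_neg (Ne.symm hax)]; exact hc)
        · rw [if_neg hca, if_neg hca]
          exact congrArg _ (ih _ hx' hc)

theorem counterFold_getD (B : List Int) (d : PySem.Dict Int Int) (x : Int) :
    (B.foldl (fun d y => d.insert y (d.getD y 0 + 1)) d).getD x 0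
      = d.getD x 0 + (B.count x : Int) := by
  induction B generalizing d with
  | nil => simp
  | cons y t ih =>
      rw [List.foldl_cons, ih, PySem.Dict.getD_insert]
      by_cases hxy : x = y <;> simp [hxy, List.count_cons] <;> omega

theorem keptFold (A : List Int) (k : List Int) (d : PySem.Dict Int Int) :
    (A.foldl (fun (p : List Int × PySem.Dict Int Int) a =>
      if p.2.getD a 0 > 0 then (p.1, p.2.insert a (p.2.getD a 0 - 1))
      else (p.1 ++ [a], p.2)) (k, d)).1
      = k ++ strip A (fun x => d.getD x 0) := by
  induction A generalizing k d with
  | nil => simp [strip]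
  | cons a t ih =>
      simp only [List.foldl_cons, strip]
      split_ifs with hpos
      · rw [ih]
        refine congrArg _ (strip_congr _ _ _ (fun b _ => ?_))
        simp [PySem.Dict.getD_insert]
      · rw [ih, List.append_assoc]
        rfl

theorem foo2_alt_eq (A B : List Int) :
    foo2_alt A B
      = strip A (fun x => (B.count x : Int)) ++ B.filter (fun x => decide (x ∉ A)) := by
  unfold foo2_alt
  simp only [keptFold, List.nil_append]
  have hc : (fun x =>
      (B.foldl (fun (d : PySem.Dict Int Int) x => d.insert x (d.getD x 0 + 1))
        PySem.Dict.empty).getD x 0)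
      = fun x => (B.count x : Int) := by
    funext x
    rw [counterFold_getD]
    simp
  rw [hc]
  refine congrArg _ (List.filter_congr fun x _ => ?_)
  simp [PySem.Set.mem_ofList]

theorem loopA_eq (A0 : List Int) (B u v : List Int)
    (hu : ∀ y ∈ u, y ∈ A0) (hv : ∀ y ∈ v, y ∉ A0)
    (hc : ∀ x ∈ A0, B.count x ≤ u.count x) :
    B.foldl (fun (acc : Option (List Int)) x =>
        acc.bind (fun lst => if x ∉ A0 then some (lst ++ [x]) else PySem.List.remove? lst x))
      (some (u ++ v))
      = some (strip u (fun x => (B.count x : Int)) ++ v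
              ++ B.filter (fun x => decide (x ∉ A0))) := by
  induction B generalizing u v with
  | nil =>
      simp only [List.foldl_nil, List.filter_nil, List.append_nil, List.count_nil]
      rw [strip_of_nonpos u _ (fun a _ => by simp)]
  | cons x B ih =>
      rw [List.foldl_cons]
      by_cases hxA : x ∈ A0
      · -- remove branch
        have hxu : x ∈ u := by
          have h1 := hc x hxA
          rw [List.count_cons_self] at h1
          exact List.count_pos_iff.mp (by omega)
        have hrem : PySem.List.remove? (u ++ v) x = some (u.erase x ++ v) := by
          rw [PySem.List.remove?_eq_some_erase (u ++ v) x (List.mem_append_left v hxu),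
              List.erase_append_left v hxu]
        simp only [Option.bind_some]
        rw [if_neg (not_not_intro hxA), hrem]
        rw [ih (u.erase x) v (fun y hy => hu y (List.mem_of_mem_erase hy)) hv
            (fun y hyA => ?_)]
        · have hfilter : (x :: B).filter (fun z => decide (z ∉ A0)) = B.filter (fun z => decide (z ∉ A0)) := by
            simp [hxA]
          rw [hfilter]
          have hstrip : strip u (fun z => ((x :: B).count z : Int))
              = strip (u.erase x) (fun z => (B.count z : Int)) := by
            have h1 : strip u (fun z => ((x :: B).count z : Int))
                = strip u (fun z => if z = x then (B.count x : Int) + 1 else (B.count z : Int)) := by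
              refine strip_congr _ _ _ (fun a _ => ?_)
              by_cases hax : a = x
              · simp [hax, List.count_cons_self]
              · simp [hax, Ne.symm hax]
            rw [h1]
            exact strip_bump u x _ hxu (by positivity)
          rw [hstrip]
        · -- counts for erase
          by_cases hyx : y = x
          · subst hyx
            have h1 := hc y hxA
            have h2 : (y :: B).count y = B.count y + 1 := by simp [List.count_cons_self]
            have h3 : (u.erase y).count y = u.count y - 1 := List.count_erase_self
            omega
          · have h1 := hc y hyA
            have h2 : (x :: B).count y = B.count y := by simp [Ne.symm hyx]
            have h3 : (u.erase x).count y = u.count y := List.count_erase_of_ne hyx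
            omega
      · -- append branch
        simp only [Option.bind_some]
        rw [if_pos hxA]
        rw [show (u ++ v) ++ [x] = u ++ (v ++ [x]) from List.append_assoc u v [x]]
        rw [ih u (v ++ [x]) hu
            (fun y hy => by rcases List.mem_append.mp hy with h | h
                            · exact hv y h
                            · simp at h; subst h; exact hxA)
            (fun y hyA => by
              have h1 := hc y hyA
              have : B.count y ≤ (x :: B).count y := by
                by_cases hyx : y = x <;> simp [List.count_cons, hyx]
              omega)]
        have hfilter : (x :: B).filter (fun z => decide (z ∉ A0)) = x :: B.filter (fun z => decide (z ∉ A0)) := by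
          simp [hxA]
        have hstrip : strip u (fun z => ((x :: B).count z : Int)) = strip u (fun z => (B.count z : Int)) := by
          refine strip_congr _ _ _ (fun a ha => ?_)
          have hax : a ≠ x := fun h => hxA (h ▸ hu a ha)
          simp [Ne.symm hax]
        rw [hfilter, hstrip]
        simp

-- ===== VERDICT (by name: the statement is the Claim_ definition above) =====
theorem foo2_spec : Claim_equal_foo2 := by
  intro A B _ hpre
  unfold Spec_foo2
  have h := loopA_eq A B A [] (fun _ h => h) (by simp) (fun x hx => hpre x hx)
  simp only [List.append_nil] at h
  unfold foo2
  rw [List.nil_append, h, foo2_alt_eq]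
  simp
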